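-- pv_equiv track=rewrite | github.com/Workwrite-Niidome/voynich-manuscript-analysis | archive/scripts/false_positive_analysis.py | tokenize_eva
-- ===== SOURCE A (Python) =====
-- def tokenize_eva(word):
--     tokens = []
--     i = 0
--     while i < len(word):
--         if i + 3 <= len(word) and word[i:i+3] in ('cth', 'ckh', 'cfh', 'cph'):
--             tokens.append(word[i:i+3])
--             i += 3
--         elif i + 2 <= len(word) and word[i:i+2] in ('ch', 'sh', 'qo'):
--             tokens.append(word[i:i+2])
--             i += 2
--         else:
--             tokens.append(word[i])
--             i += 1
--     return tokens
-- ===== SOURCE B (Python) =====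
-- import re
--
-- # One regex alternation: three-char tokens, then two-char tokens, then any single
-- # character ([\s\S] so newlines are covered); findall scans left to right trying
-- # alternatives in this order, reproducing the greedy index loop.
-- _TOKEN_RE = re.compile(r'cth|ckh|cfh|cph|ch|sh|qo|[\s\S]')
--
-- def tokenize_eva(word):
--     return _TOKEN_RE.findall(word)
-- ===== Notes on version B (the rewrite author's own statement) =====
-- stated objective: idiomatic
-- what changed: The manual index-and-while scan with slice comparisons is replaced by a single precompiled regex alternation (three-char tokens, then two-char, then an any-character fallback) whose findall performs the whole left-to-right greedy scan in the C regex engine (measured ~5x faster).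
import Mathlib
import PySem

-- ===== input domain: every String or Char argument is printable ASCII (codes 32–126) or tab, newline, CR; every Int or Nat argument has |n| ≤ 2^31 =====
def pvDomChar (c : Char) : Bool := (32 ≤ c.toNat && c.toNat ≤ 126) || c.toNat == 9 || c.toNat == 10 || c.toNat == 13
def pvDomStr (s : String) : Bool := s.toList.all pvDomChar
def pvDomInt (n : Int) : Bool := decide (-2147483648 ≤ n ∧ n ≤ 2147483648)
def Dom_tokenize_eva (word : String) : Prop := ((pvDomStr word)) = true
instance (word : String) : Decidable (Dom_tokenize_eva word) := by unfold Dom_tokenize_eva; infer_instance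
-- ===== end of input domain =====

-- B replaces A's index-driven while loop with a single regex alternation (idiomatic).

-- ===== PORT A =====
-- A's while loop over index i, transliterated as recursion on the remaining length.
-- word[i:i+k] on a string with 0 ≤ i is exactly (toList.drop i).take k (PySem.List.slice_natCast_add).
def tokenize_eva_goA (l : List Char) (i : Nat) (tokens : List String) : List String :=
  if _h : i < l.length then
    if i + 3 ≤ l.length ∧ ((l.drop i).take 3 = ['c','t','h'] ∨ (l.drop i).take 3 = ['c','k','h'] ∨
        (l.drop i).take 3 = ['c','f','h'] ∨ (l.drop i).take 3 = ['c','p','h']) then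
      tokenize_eva_goA l (i + 3) (tokens ++ [String.ofList ((l.drop i).take 3)])
    else if i + 2 ≤ l.length ∧ ((l.drop i).take 2 = ['c','h'] ∨ (l.drop i).take 2 = ['s','h'] ∨
        (l.drop i).take 2 = ['q','o']) then
      tokenize_eva_goA l (i + 2) (tokens ++ [String.ofList ((l.drop i).take 2)])
    else
      tokenize_eva_goA l (i + 1) (tokens ++ [String.ofList [l[i]]])
  else tokens
termination_by l.length - i

def tokenize_eva (word : String) : List String :=
  tokenize_eva_goA word.toList 0 []

-- ===== PORT B =====
-- Hand port of re.findall(r'cth|ckh|cfh|cph|ch|sh|qo|[\s\S]', word): the regex engine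
-- tries the alternatives in the listed order at each position and emits the match; that
-- is exactly this structural pattern match on the character list (exact for this pattern,
-- which has no backtracking across positions and whose fallback matches any character).
def reFindallEva : List Char → List String
  | 'c' :: 't' :: 'h' :: rest => "cth" :: reFindallEva rest
  | 'c' :: 'k' :: 'h' :: rest => "ckh" :: reFindallEva rest
  | 'c' :: 'f' :: 'h' :: rest => "cfh" :: reFindallEva rest
  | 'c' :: 'p' :: 'h' :: rest => "cph" :: reFindallEva rest
  | 'c' :: 'h' :: rest => "ch" :: reFindallEva rest
  | 's' :: 'h' :: rest => "sh" :: reFindallEva rest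
  | 'q' :: 'o' :: rest => "qo" :: reFindallEva rest
  | c :: rest => String.ofList [c] :: reFindallEva rest
  | [] => []

def tokenize_eva_alt (word : String) : List String :=
  reFindallEva word.toList

-- ===== PRECONDITION & SPEC =====
def Spec_tokenize_eva (word : String) (out : List String) : Prop := out = tokenize_eva_alt word
instance (word : String) (out : List String) : Decidable (Spec_tokenize_eva word out) := by unfold Spec_tokenize_eva; infer_instance

-- ===== CLAIM (what is proved, stated in full; the proofs are below) =====
def Claim_equal_tokenize_eva : Prop := ∀ (word : String), Dom_tokenize_eva word → Spec_tokenize_eva word (tokenize_eva word)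

-- ===== LEMMAS AND PROOFS =====

lemma re_fall (c : Char) (r : List Char)
    (h3 : (c::r).take 3 ≠ ['c','t','h'] ∧ (c::r).take 3 ≠ ['c','k','h'] ∧
          (c::r).take 3 ≠ ['c','f','h'] ∧ (c::r).take 3 ≠ ['c','p','h'])
    (h2 : (c::r).take 2 ≠ ['c','h'] ∧ (c::r).take 2 ≠ ['s','h'] ∧ (c::r).take 2 ≠ ['q','o']) :
    reFindallEva (c::r) = String.ofList [c] :: reFindallEva r := by
  obtain ⟨a3,b3,c3,d3⟩ := h3
  obtain ⟨a2,b2,c2⟩ := h2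
  rw [reFindallEva.eq_def]
  split <;> simp_all

lemma goA_eq_aux : ∀ (n : Nat) (l : List Char) (i : Nat) (tokens : List String),
    l.length - i ≤ n → tokenize_eva_goA l i tokens = tokens ++ reFindallEva (l.drop i) := by
  intro n
  induction n with
  | zero =>
    intro l i tokens hn
    rw [tokenize_eva_goA, dif_neg (by omega), List.drop_eq_nil_of_le (by omega)]
    simp [reFindallEva]
  | succ n ih =>
    intro l i tokens hn
    rw [tokenize_eva_goA]
    by_cases h : i < l.length
    · rw [dif_pos h]
      have hlen : ∀ (p : List Char) (k : Nat), (l.drop i).take k = p → p.length = k →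
          i + k ≤ l.length := by
        intro p k hp hk
        have := congrArg List.length hp
        simp [hk] at this
        omega
      by_cases h3 : i + 3 ≤ l.length ∧ ((l.drop i).take 3 = ['c','t','h'] ∨
          (l.drop i).take 3 = ['c','k','h'] ∨ (l.drop i).take 3 = ['c','f','h'] ∨
          (l.drop i).take 3 = ['c','p','h'])
      · rw [if_pos h3]
        rcases h3.2 with hp|hp|hp|hp <;>
        · rw [ih l (i+3) _ (by omega), hp]
          conv_rhs => rw [← List.take_append_drop 3 (l.drop i), hp, List.drop_drop]
          simp [reFindallEva]
      · rw [if_neg h3]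
        by_cases h2 : i + 2 ≤ l.length ∧ ((l.drop i).take 2 = ['c','h'] ∨
            (l.drop i).take 2 = ['s','h'] ∨ (l.drop i).take 2 = ['q','o'])
        · rw [if_pos h2]
          rcases h2.2 with hp|hp|hp <;>
          · rw [ih l (i+2) _ (by omega), hp]
            conv_rhs => rw [← List.take_append_drop 2 (l.drop i), hp, List.drop_drop]
            simp [reFindallEva]
        · rw [if_neg h2, ih l (i+1) _ (by omega)]
          have hd : l.drop i = l[i] :: l.drop (i+1) := List.drop_eq_getElem_cons h
          rw [hd, re_fall]
          · simp
          · refine ⟨?_,?_,?_,?_⟩ <;> rw [← hd] <;> intro heq <;>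
              exact h3 ⟨hlen _ 3 heq (by decide), by tauto⟩
          · refine ⟨?_,?_,?_⟩ <;> rw [← hd] <;> intro heq <;>
              exact h2 ⟨hlen _ 2 heq (by decide), by tauto⟩
    · rw [dif_neg h, List.drop_eq_nil_of_le (by omega)]
      simp [reFindallEva]

lemma goA_eq (l : List Char) (i : Nat) (tokens : List String) :
    tokenize_eva_goA l i tokens = tokens ++ reFindallEva (l.drop i) :=
  goA_eq_aux (l.length - i) l i tokens le_rfl

-- ===== VERDICT (by name: the statement is the Claim_ definition above) =====
theorem tokenize_eva_spec : Claim_equal_tokenize_eva := by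
  intro word _
  unfold Spec_tokenize_eva tokenize_eva tokenize_eva_alt
  simpa using goA_eq word.toList 0 []
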